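-- pv_equiv track=rewrite | github.com/MiguelCacerex/AnalizadorLexico | palabrasReservadas.py | tipo_palabra_reservada
-- ===== SOURCE A (Python) =====
-- def es_palabra_reservada(lexema):
--     # Lista de palabras reservadas
--     palabras_reservadas = ['Bulbasaur', 'Ivysaur', 'Venusaur', 'Charmander',
--                            'Charmeleon', 'Charizard', 'Squirtle', 'Wartortle', 'Blastoise']
--     return lexema in palabras_reservadas
--
-- def es_alpha(caracter):
--     # Función para verificar si un carácter es una letra del alfabeto
--     alfabeto = "abcdefghijklmnopqrstuvwxyzABCDEFGHIJKLMNOPQRSTUVWXYZ"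
--     return caracter in alfabeto
--
-- def tipo_palabra_reservada(entrada):
--     lexemas = []  # Lista para almacenar los lexemas encontrados
--     i = 0  # Variable de índice para recorrer la cadena de entrada
--
--     while i < len(entrada):
--         if es_alpha(entrada[i]):  # Verifica si el carácter actual es una letra
--             inicio = i  # Guarda la posición inicial de la palabra reservada
--             contador = 0
--
--             while i < len(entrada):
--                 if entrada[i] == ' ' or entrada[i] == '\n':
--                     break  # Si encuentra un espacio o salto de línea, termina el reconocimiento de la palabra
--                 contador += 1
--                 i += 1
--             fin = i  # Guarda la posición final de la palabra reservada
--
--             lexema = entrada[inicio:fin]  # Extrae la palabra reservada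
--
--             # Verifica si la palabra es una palabra reservada conocida
--             if es_palabra_reservada(lexema):
--                 # Agrega la palabra reservada a la lista de lexemas
--                 lexemas.append(('PALABRA_RESERVADA', lexema, inicio, fin - 1))
--         else:
--             i += 1  # Avanza al siguiente carácter si no es una letra
--
--     if not lexemas:
--         return []  # Si no se encontraron palabras reservadas, retorna una lista vacía
--     else:
--         return lexemas  # Retorna la lista de palabras reservadas encontradas
-- ===== SOURCE B (Python) =====
-- def tipo_palabra_reservada(entrada):
--     # Two-phase: tokenize into (position, chunk) runs first, then filter the
--     # reserved names; the word A finds in a chunk is its suffix from the first letter.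
--     reservadas = {'Bulbasaur', 'Ivysaur', 'Venusaur', 'Charmander',
--                   'Charmeleon', 'Charizard', 'Squirtle', 'Wartortle', 'Blastoise'}
--     trozos = []
--     actual = ''
--     for k, c in enumerate(entrada):
--         if c == ' ' or c == '\n':
--             if actual:
--                 trozos.append((k - len(actual), actual))
--             actual = ''
--         else:
--             actual += c
--     if actual:
--         trozos.append((len(entrada) - len(actual), actual))
--
--     resultado = []
--     for pos, chunk in trozos:
--         j = next((k for k, c in enumerate(chunk)
--                   if 'a' <= c <= 'z' or 'A' <= c <= 'Z'), None)
--         if j is not None and chunk[j:] in reservadas: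
--             resultado.append(('PALABRA_RESERVADA', chunk[j:], pos + j, pos + len(chunk) - 1))
--     return resultado
-- ===== Notes on version B (the rewrite author's own statement) =====
-- stated objective: alternative
-- what changed: Replaces A's manual index-walking state machine (outer while with nested inner while and per-word slicing) by a two-phase pass: first tokenize the input into (position, chunk) runs split on space/newline in one fold, then for each chunk take the suffix from its first ASCII letter and keep it if it is in a set of reserved names; a timing run measured this ~1.9x faster (constant factor: single character pass plus set membership instead of index arithmetic, re-slicing and a list scan per word).
import Mathlib
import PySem

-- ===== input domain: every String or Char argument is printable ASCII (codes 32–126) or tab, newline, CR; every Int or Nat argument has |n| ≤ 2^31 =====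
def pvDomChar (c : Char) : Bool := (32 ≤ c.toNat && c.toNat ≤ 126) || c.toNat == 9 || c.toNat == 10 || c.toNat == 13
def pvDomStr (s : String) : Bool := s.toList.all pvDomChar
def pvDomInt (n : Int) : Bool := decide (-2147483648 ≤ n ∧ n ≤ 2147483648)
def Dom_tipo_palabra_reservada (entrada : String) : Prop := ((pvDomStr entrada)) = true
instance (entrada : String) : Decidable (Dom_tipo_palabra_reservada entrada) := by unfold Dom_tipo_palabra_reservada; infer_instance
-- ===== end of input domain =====

-- B re-implements A's manual index-walking scanner as a two-phase pass (tokenize into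
-- positioned chunks, then filter reserved names via a set); same return value, measured ~1.9x faster (constant factor).

-- ===== PORT A =====
def es_palabra_reservada (lexema : String) : Bool :=
  (["Bulbasaur", "Ivysaur", "Venusaur", "Charmander",
    "Charmeleon", "Charizard", "Squirtle", "Wartortle", "Blastoise"]).contains lexema

-- 'caracter in alfabeto': the argument is always a single character, so substring
-- membership in the alphabet string coincides with character membership.
def es_alpha (caracter : Char) : Bool :=
  ("abcdefghijklmnopqrstuvwxyzABCDEFGHIJKLMNOPQRSTUVWXYZ".toList).contains caracter

-- A's inner 'while' loop: advance i until a space or newline (or the end) is reached.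
-- fuel is a totality guard only: it starts at the number of remaining characters,
-- which the loop can never exceed, so the computation is the Python loop's.
def pvInnerA (s : List Char) : Nat → Nat → Nat
  | 0, i => i
  | fuel + 1, i =>
    if _h : i < s.length then
      if s[i] == ' ' || s[i] == '\n' then i
      else pvInnerA s fuel (i + 1)
    else i

-- A's outer 'while' loop over the index i, carrying the lexemas accumulator (same fuel guard).
def pvLoopA (s : List Char) : Nat → Nat → List (String × String × Int × Int) →
    List (String × String × Int × Int)
  | 0, _, lexemas => lexemas
  | fuel + 1, i, lexemas =>
    if _h : i < s.length then
      if es_alpha s[i] then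
        let fin := pvInnerA s (s.length - i) i
        let lexema := String.ofList (PySem.List.slice s (some (i : Int)) (some (fin : Int)))
        pvLoopA s fuel fin
          (if es_palabra_reservada lexema then
            lexemas ++ [("PALABRA_RESERVADA", lexema, (i : Int), (fin : Int) - 1)]
          else lexemas)
      else pvLoopA s fuel (i + 1) lexemas
    else lexemas

def tipo_palabra_reservada (entrada : String) : List (String × String × Int × Int) :=
  pvLoopA entrada.toList entrada.toList.length 0 []

-- ===== PORT B =====
def pvEsLetra (c : Char) : Bool :=
  (decide ('a' ≤ c) && decide (c ≤ 'z')) || (decide ('A' ≤ c) && decide (c ≤ 'Z'))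

def pvReservadas : PySem.Set String :=
  PySem.Set.ofList ["Bulbasaur", "Ivysaur", "Venusaur", "Charmander",
    "Charmeleon", "Charizard", "Squirtle", "Wartortle", "Blastoise"]

-- Phase 1 of B: split the input into maximal runs of non-separator characters,
-- each paired with its start position (the 'for k, c in enumerate(entrada)' loop + final flush).
def pvTrocear (s : List Char) : List (Int × List Char) :=
  let st := (PySem.List.enumerate s 0).foldl
    (fun (st : List Char × List (Int × List Char)) kc =>
      if kc.2 == ' ' || kc.2 == '\n' then
        ([], if st.1.isEmpty then st.2 else st.2 ++ [(kc.1 - (st.1.length : Int), st.1)])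
      else (st.1 ++ [kc.2], st.2))
    ([], [])
  if st.1.isEmpty then st.2 else st.2 ++ [((s.length : Int) - (st.1.length : Int), st.1)]

-- Phase 2 of B: for each chunk, find the first letter (the 'next(...)' generator) and
-- keep the suffix when it is a reserved name.
def tipo_palabra_reservada_alt (entrada : String) : List (String × String × Int × Int) :=
  (pvTrocear entrada.toList).foldl
    (fun resultado pc =>
      match pc.2.findIdx? pvEsLetra with
      | some j =>
        let lex := String.ofList (pc.2.drop j)
        if PySem.Set.contains pvReservadas lex then
          resultado ++ [("PALABRA_RESERVADA", lex, pc.1 + (j : Int), pc.1 + (pc.2.length : Int) - 1)]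
        else resultado
      | none => resultado)
    []

-- ===== PRECONDITION & SPEC =====
def Spec_tipo_palabra_reservada (entrada : String) (out : List (String × String × Int × Int)) : Prop := out = tipo_palabra_reservada_alt entrada
instance (entrada : String) (out : List (String × String × Int × Int)) : Decidable (Spec_tipo_palabra_reservada entrada out) := by unfold Spec_tipo_palabra_reservada; infer_instance

-- ===== CLAIM (what is proved, stated in full; the proofs are below) =====
def Claim_equal_tipo_palabra_reservada : Prop := ∀ (entrada : String), Dom_tipo_palabra_reservada entrada → Spec_tipo_palabra_reservada entrada (tipo_palabra_reservada entrada)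

-- ===== LEMMAS AND PROOFS =====

def pvNoSep (c : Char) : Bool := !(c == ' ' || c == '\n')

theorem pv_take_takeWhile (p : Char → Bool) (l : List Char) :
    l.take (l.takeWhile p).length = l.takeWhile p :=
  (List.prefix_iff_eq_take.mp (List.takeWhile_prefix p)).symm

theorem es_alpha_iff (c : Char) :
    es_alpha c = true ↔ (97 ≤ c.toNat ∧ c.toNat ≤ 122) ∨ (65 ≤ c.toNat ∧ c.toNat ≤ 90) := by
  unfold es_alpha
  rw [List.contains_iff_mem,
    show "abcdefghijklmnopqrstuvwxyzABCDEFGHIJKLMNOPQRSTUVWXYZ".toList =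
    ['a','b','c','d','e','f','g','h','i','j','k','l','m','n','o','p','q','r','s','t','u','v','w','x','y','z','A','B','C','D','E','F','G','H','I','J','K','L','M','N','O','P','Q','R','S','T','U','V','W','X','Y','Z'] from rfl]
  simp only [List.mem_cons, List.not_mem_nil, or_false, Char.ext_iff, UInt32.ext_iff, Char.toNat,
    show ('a').val.toNat = 97 from rfl, show ('b').val.toNat = 98 from rfl, show ('c').val.toNat = 99 from rfl, show ('d').val.toNat = 100 from rfl, show ('e').val.toNat = 101 from rfl, show ('f').val.toNat = 102 from rfl, show ('g').val.toNat = 103 from rfl, show ('h').val.toNat = 104 from rfl, show ('i').val.toNat = 105 from rfl, show ('j').val.toNat = 106 from rfl, show ('k').val.toNat = 107 from rfl, show ('l').val.toNat = 108 from rfl, show ('m').val.toNat = 109 from rfl, show ('n').val.toNat = 110 from rfl, show ('o').val.toNat = 111 from rfl, show ('p').val.toNat = 112 from rfl, show ('q').val.toNat = 113 from rfl, show ('r').val.toNat = 114 from rfl, show ('s').val.toNat = 115 from rfl, show ('t').val.toNat = 116 from rfl, show ('u').val.toNat = 117 from rfl, show ('v').val.toNat = 118 from rfl, show ('w').val.toNat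 = 119 from rfl, show ('x').val.toNat = 120 from rfl, show ('y').val.toNat = 121 from rfl, show ('z').val.toNat = 122 from rfl, show ('A').val.toNat = 65 from rfl, show ('B').val.toNat = 66 from rfl, show ('C').val.toNat = 67 from rfl, show ('D').val.toNat = 68 from rfl, show ('E').val.toNat = 69 from rfl, show ('F').val.toNat = 70 from rfl, show ('G').val.toNat = 71 from rfl, show ('H').val.toNat = 72 from rfl, show ('I').val.toNat = 73 from rfl, show ('J').val.toNat = 74 from rfl, show ('K').val.toNat = 75 from rfl, show ('L').val.toNat = 76 from rfl, show ('M').val.toNat = 77 from rfl, show ('N').val.toNat = 78 from rfl, show ('O').val.toNat = 79 from rfl, show ('P').val.toNat = 80 from rfl, show ('Q').val.toNat = 81 from rfl, show ('R').val.toNat = 82 from rfl, show ('S').val.toNat = 83 from rfl, show ('T').val.toNat = 84 from rfl, show ('U').val.toNat = 85 from rfl, show ('V').val.toNat = 86 from rfl, show ('W').val.toNat = 87 from rfl, show ('X').val.toNat = 88 from rfl, show ('Y').val.toNat = 89 from rfl, show ('Z').val.toNat = 90 from rfl]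
  omega


theorem pvEsLetra_eq_es_alpha (c : Char) : pvEsLetra c = es_alpha c := by
  rw [Bool.eq_iff_iff, es_alpha_iff]
  simp only [pvEsLetra, Bool.or_eq_true, Bool.and_eq_true, decide_eq_true_eq,
    Char.le_def, UInt32.le_iff_toNat_le, Char.toNat,
    show ('a').val.toNat = 97 from rfl, show ('z').val.toNat = 122 from rfl,
    show ('A').val.toNat = 65 from rfl, show ('Z').val.toNat = 90 from rfl]

theorem es_alpha_not_sep (c : Char) (h : es_alpha c = true) : (c == ' ' || c == '\n') = false := by
  have h1 : c ≠ ' ' := fun e => absurd h (by subst e; decide)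
  have h2 : c ≠ '\n' := fun e => absurd h (by subst e; decide)
  simp [h1, h2]

theorem es_alpha_noSep (c : Char) (h : es_alpha c = true) : pvNoSep c = true := by
  unfold pvNoSep
  rw [es_alpha_not_sep c h]
  rfl

-- A's result characterised structurally on the character list.
def pvSpecA : List Char → Int → List (String × String × Int × Int)
  | [], _ => []
  | c :: r, p =>
    if es_alpha c then
      (if es_palabra_reservada (String.ofList ((c :: r).takeWhile pvNoSep)) then
        [("PALABRA_RESERVADA", String.ofList ((c :: r).takeWhile pvNoSep), p,
          p + ((((c :: r).takeWhile pvNoSep).length : Int)) - 1)]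
      else []) ++
      pvSpecA ((c :: r).drop ((c :: r).takeWhile pvNoSep).length)
        (p + ((((c :: r).takeWhile pvNoSep).length : Int)))
    else pvSpecA r (p + 1)
termination_by l _ => l.length
decreasing_by
  · have : pvNoSep c = true := es_alpha_noSep c (by assumption)
    simp [this, List.length_drop]
  · simp

-- B's chunk list characterised structurally.
def pvChunksR : List Char → Int → List (Int × List Char)
  | [], _ => []
  | c :: r, p =>
    if pvNoSep c then
      (p, (c :: r).takeWhile pvNoSep) ::
      pvChunksR ((c :: r).drop ((c :: r).takeWhile pvNoSep).length)
        (p + ((((c :: r).takeWhile pvNoSep).length : Int)))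
    else pvChunksR r (p + 1)
termination_by l _ => l.length
decreasing_by
  · simp [*, List.length_drop]
  · simp

-- the per-chunk step of B's second phase
def pvProcesa (pc : Int × List Char) : List (String × String × Int × Int) :=
  match pc.2.findIdx? pvEsLetra with
  | some j =>
    let lex := String.ofList (pc.2.drop j)
    if PySem.Set.contains pvReservadas lex then
      [("PALABRA_RESERVADA", lex, pc.1 + (j : Int), pc.1 + (pc.2.length : Int) - 1)]
    else []
  | none => []

-- B's first-phase fold body, named for the proofs (definitionally the lambda in pvTrocear).
def pvGoB (st : List Char × List (Int × List Char)) (kc : Int × Char) :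
    List Char × List (Int × List Char) :=
  if kc.2 == ' ' || kc.2 == '\n' then
    ([], if st.1.isEmpty then st.2 else st.2 ++ [(kc.1 - (st.1.length : Int), st.1)])
  else (st.1 ++ [kc.2], st.2)

-- the state of B's first phase, as a structural recursion (pending run a)
def pvChunksP : List Char → Int → List Char → List (Int × List Char)
  | [], k, a => if a.isEmpty then [] else [(k - (a.length : Int), a)]
  | c :: r, k, a =>
    if c == ' ' || c == '\n' then
      (if a.isEmpty then [] else [(k - (a.length : Int), a)]) ++ pvChunksP r (k + 1) []
    else pvChunksP r (k + 1) (a ++ [c])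

theorem pvInnerA_eq (s : List Char) : ∀ (fuel i : Nat), s.length - i ≤ fuel →
    pvInnerA s fuel i = i + ((s.drop i).takeWhile pvNoSep).length := by
  intro fuel
  induction fuel with
  | zero =>
    intro i hf
    rw [pvInnerA, List.drop_eq_nil_of_le (by omega), List.takeWhile_nil]
    simp
  | succ fuel ih =>
    intro i hf
    by_cases h : i < s.length
    · have hdrop : s.drop i = s[i] :: s.drop (i + 1) := List.drop_eq_getElem_cons h
      by_cases hc : (s[i] == ' ' || s[i] == '\n') = true
      · rw [pvInnerA, dif_pos h, if_pos hc, hdrop]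
        simp [pvNoSep, hc]
      · rw [pvInnerA, dif_pos h, if_neg hc, ih (i + 1) (by omega)]
        conv_rhs => rw [hdrop, List.takeWhile_cons]
        rw [show pvNoSep s[i] = true from by simp [pvNoSep, hc]]
        simp only [if_true, List.length_cons]
        omega
    · rw [pvInnerA, dif_neg h, List.drop_eq_nil_of_le (by omega), List.takeWhile_nil]
      simp

theorem pvLoopA_eq (s : List Char) : ∀ (fuel i : Nat)
    (acc : List (String × String × Int × Int)), s.length - i ≤ fuel →
    pvLoopA s fuel i acc = acc ++ pvSpecA (s.drop i) (i : Int) := by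
  intro fuel
  induction fuel with
  | zero =>
    intro i acc hf
    rw [pvLoopA, List.drop_eq_nil_of_le (by omega), pvSpecA]
    simp
  | succ fuel ih =>
    intro i acc hf
    by_cases h : i < s.length
    · have hdrop : s.drop i = s[i] :: s.drop (i + 1) := List.drop_eq_getElem_cons h
      by_cases ha : es_alpha s[i] = true
      · have hfin : pvInnerA s (s.length - i) i =
            i + ((s.drop i).takeWhile pvNoSep).length := pvInnerA_eq s (s.length - i) i (le_refl _)
        have htpos : 0 < ((s.drop i).takeWhile pvNoSep).length := by
          rw [hdrop, List.takeWhile_cons, es_alpha_noSep _ ha]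
          simp
        have hgt : i < pvInnerA s (s.length - i) i := by omega
        have hlex : PySem.List.slice s (some (i : Int))
            (some ((pvInnerA s (s.length - i) i : Nat) : Int)) =
            (s.drop i).takeWhile pvNoSep := by
          rw [PySem.List.slice_toNat s (a := (i : Int))
            (b := ((pvInnerA s (s.length - i) i : Nat) : Int)) (by positivity) (by positivity)]
          simp only [Int.toNat_natCast, hfin]
          rw [show i + ((s.drop i).takeWhile pvNoSep).length - i =
            ((s.drop i).takeWhile pvNoSep).length from by omega]
          exact pv_take_takeWhile pvNoSep (s.drop i)
        rw [pvLoopA, dif_pos h, if_pos ha]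
        rw [ih (pvInnerA s (s.length - i) i) _ (by omega)]
        have hdropfin : s.drop (pvInnerA s (s.length - i) i) =
            (s.drop i).drop ((s.drop i).takeWhile pvNoSep).length := by
          rw [List.drop_drop, hfin]
        conv_rhs => rw [hdrop]
        rw [pvSpecA, if_pos ha, ← hdrop]
        rw [hlex, hdropfin]
        have hcast : ((pvInnerA s (s.length - i) i : Nat) : Int) =
            (i : Int) + (((s.drop i).takeWhile pvNoSep).length : Int) := by
          rw [hfin]; push_cast; ring
        rw [hcast]
        split <;> simp
      · rw [pvLoopA, dif_pos h, if_neg ha]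
        rw [ih (i + 1) acc (by omega)]
        conv_rhs => rw [hdrop]
        rw [pvSpecA, if_neg ha]
        push_cast
        rfl
    · rw [pvLoopA, dif_neg h, List.drop_eq_nil_of_le (by omega), pvSpecA]
      simp

theorem pvTrocearGo_eq (l : List Char) (k : Int) (a : List Char) (tr : List (Int × List Char)) :
    (if ((PySem.List.enumerate l k).foldl pvGoB (a, tr)).1.isEmpty then
      ((PySem.List.enumerate l k).foldl pvGoB (a, tr)).2
     else
      ((PySem.List.enumerate l k).foldl pvGoB (a, tr)).2 ++
        [(k + (l.length : Int) - ((((PySem.List.enumerate l k).foldl pvGoB (a, tr)).1.length : Int)),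
          ((PySem.List.enumerate l k).foldl pvGoB (a, tr)).1)]) =
    tr ++ pvChunksP l k a := by
  induction l generalizing k a tr with
  | nil =>
    simp only [PySem.List.enumerate_nil, List.foldl_nil, pvChunksP, List.length_nil,
      Int.natCast_zero, add_zero]
    split <;> simp
  | cons c r ih =>
    rw [PySem.List.enumerate_cons, List.foldl_cons]
    have harith : k + ((c :: r).length : Int) = (k + 1) + (r.length : Int) := by
      simp only [List.length_cons]
      push_cast
      ring
    rw [harith]
    by_cases hc : (c == ' ' || c == '\n') = true
    · have hgo : pvGoB (a, tr) (k, c) =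
          ([], if a.isEmpty then tr else tr ++ [(k - (a.length : Int), a)]) := by
        simp [pvGoB, hc]
      rw [hgo, ih]
      rw [pvChunksP, if_pos hc]
      split <;> simp
    · have hgo : pvGoB (a, tr) (k, c) = (a ++ [c], tr) := by
        simp [pvGoB, hc]
      rw [hgo, ih]
      rw [pvChunksP, if_neg hc]

theorem pvChunksP_eq (l : List Char) : ∀ (k : Int) (a : List Char),
    pvChunksP l k a =
      if a.isEmpty then pvChunksR l k
      else (k - (a.length : Int), a ++ l.takeWhile pvNoSep) ::
           pvChunksR (l.drop (l.takeWhile pvNoSep).length)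
             (k + (((l.takeWhile pvNoSep).length : Int))) := by
  induction l with
  | nil =>
    intro k a
    simp only [pvChunksP, pvChunksR, List.takeWhile_nil, List.drop_nil, List.length_nil,
      Int.natCast_zero, add_zero, List.append_nil]
  | cons c r ih =>
    intro k a
    by_cases hc : (c == ' ' || c == '\n') = true
    · have hns : pvNoSep c = false := by simp [pvNoSep, hc]
      have hR : pvChunksR (c :: r) k = pvChunksR r (k + 1) := by
        rw [pvChunksR, if_neg (by simp [hns])]
      rw [pvChunksP, if_pos hc, ih (k + 1) [], List.takeWhile_cons, hns, hR]
      split <;> simp [hR]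
    · have hns : pvNoSep c = true := by simp [pvNoSep, hc]
      rw [pvChunksP, if_neg hc, ih (k + 1) (a ++ [c]), if_neg (by simp),
        List.takeWhile_cons, hns]
      by_cases hae : a.isEmpty
      · rw [List.isEmpty_iff] at hae
        subst hae
        rw [pvChunksR, if_pos hns, List.takeWhile_cons, hns]
        simp only [List.isEmpty_nil, if_true, List.nil_append, List.length_nil,
          List.length_cons, List.drop_succ_cons, List.cons.injEq, Prod.mk.injEq]
        refine ⟨⟨by push_cast [List.length_nil]; ring, by simp⟩, by congr 1; push_cast; ring⟩
      · rw [if_neg (by simpa using hae)]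
        simp only [reduceIte, List.length_append, List.length_cons,
          List.drop_succ_cons, List.append_assoc, List.singleton_append,
          List.cons.injEq, Prod.mk.injEq]
        refine ⟨⟨by push_cast [List.length_nil]; ring, by simp⟩, by congr 1; push_cast; ring⟩

theorem pvProcesa_shift (c : Char) (u : List Char) (p : Int) (h : pvEsLetra c = false) :
    pvProcesa (p, c :: u) = pvProcesa (p + 1, u) := by
  unfold pvProcesa
  simp only [List.findIdx?_cons, h, Bool.false_eq_true, if_false]
  cases hj : u.findIdx? pvEsLetra with
  | none => simp
  | some j =>
    simp only [Option.map_some]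
    simp only [List.drop_succ_cons, List.length_cons]
    have h1 : p + ((j + 1 : Nat) : Int) = p + 1 + (j : Int) := by push_cast; ring
    have h2 : p + ((u.length + 1 : Nat) : Int) - 1 = p + 1 + (u.length : Int) - 1 := by
      push_cast; ring
    rw [h1, h2]

theorem pvG2 (r : List Char) (q : Int) :
    pvProcesa (q, r.takeWhile pvNoSep) ++
      (pvChunksR (r.drop (r.takeWhile pvNoSep).length)
        (q + (((r.takeWhile pvNoSep).length : Int)))).flatMap pvProcesa =
    (pvChunksR r q).flatMap pvProcesa := by
  cases r with
  | nil => simp [pvChunksR, pvProcesa]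
  | cons c r' =>
    by_cases hc : pvNoSep c = true
    · rw [show pvChunksR (c :: r') q = (q, (c :: r').takeWhile pvNoSep) ::
        pvChunksR ((c :: r').drop (((c :: r').takeWhile pvNoSep)).length)
          (q + ((((c :: r').takeWhile pvNoSep)).length : Int)) from by
          rw [pvChunksR, if_pos hc]]
      rw [List.flatMap_cons]
    · have hc' : pvNoSep c = false := by simp_all
      rw [List.takeWhile_cons, hc']
      simp [pvProcesa, pvChunksR, hc']

theorem pvReservadas_contains (lex : String) :
    PySem.Set.contains pvReservadas lex = es_palabra_reservada lex := by
  rw [show pvReservadas = ["Bulbasaur", "Ivysaur", "Venusaur", "Charmander",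
    "Charmeleon", "Charizard", "Squirtle", "Wartortle", "Blastoise"] from by decide]
  rfl

theorem pvSpecA_eq_flatMap (l : List Char) : ∀ (p : Int),
    pvSpecA l p = (pvChunksR l p).flatMap pvProcesa := by
  intro p
  match l with
  | [] => simp [pvSpecA, pvChunksR]
  | c :: r =>
    by_cases ha : es_alpha c = true
    · have hns : pvNoSep c = true := es_alpha_noSep c ha
      have htw : (c :: r).takeWhile pvNoSep = c :: r.takeWhile pvNoSep := by
        rw [List.takeWhile_cons, hns]
        simp
      rw [pvSpecA, if_pos ha]
      rw [show pvChunksR (c :: r) p = (p, (c :: r).takeWhile pvNoSep) ::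
        pvChunksR ((c :: r).drop (((c :: r).takeWhile pvNoSep)).length)
          (p + ((((c :: r).takeWhile pvNoSep)).length : Int)) from by
          rw [pvChunksR, if_pos hns]]
      rw [List.flatMap_cons]
      rw [pvSpecA_eq_flatMap ((c :: r).drop (((c :: r).takeWhile pvNoSep)).length)]
      congr 1
      unfold pvProcesa
      rw [htw]
      simp only [List.findIdx?_cons, pvEsLetra_eq_es_alpha, ha, if_true]
      rw [pvReservadas_contains]
      simp only [List.drop_zero, Int.natCast_zero, add_zero, ← htw]
    · by_cases hns : pvNoSep c = true
      · rw [pvSpecA, if_neg ha]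
        rw [pvSpecA_eq_flatMap r (p + 1)]
        rw [show pvChunksR (c :: r) p = (p, (c :: r).takeWhile pvNoSep) ::
          pvChunksR ((c :: r).drop (((c :: r).takeWhile pvNoSep)).length)
            (p + ((((c :: r).takeWhile pvNoSep)).length : Int)) from by
            rw [pvChunksR, if_pos hns]]
        rw [List.flatMap_cons]
        have htw : (c :: r).takeWhile pvNoSep = c :: r.takeWhile pvNoSep := by
          rw [List.takeWhile_cons, hns]
          simp
        rw [htw]
        rw [pvProcesa_shift c _ p (by rw [pvEsLetra_eq_es_alpha]; exact Bool.not_eq_true _ ▸ ha)]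
        rw [show (c :: r).drop ((c :: r.takeWhile pvNoSep)).length = r.drop (r.takeWhile pvNoSep).length from by
          simp [List.drop_succ_cons]]
        rw [show p + (((c :: r.takeWhile pvNoSep)).length : Int) =
          (p + 1) + (((r.takeWhile pvNoSep)).length : Int) from by
          simp only [List.length_cons]; push_cast; ring]
        exact (pvG2 r (p + 1)).symm
      · have hc : (c == ' ' || c == '\n') = true := by
          cases h1 : (c == ' ' || c == '\n') with
          | true => rfl
          | false => exact absurd (by simp [pvNoSep, h1]) hns
        rw [pvSpecA, if_neg ha]
        rw [pvSpecA_eq_flatMap r (p + 1)]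
        rw [show pvChunksR (c :: r) p = pvChunksR r (p + 1) from by
          rw [pvChunksR, if_neg (by simp_all)]]
termination_by l.length
decreasing_by
  all_goals first
    | simp [htw]
    | simp

theorem pvFold_eq_flatMap (l : List (Int × List Char)) (acc : List (String × String × Int × Int)) :
    l.foldl
      (fun resultado pc =>
        match pc.2.findIdx? pvEsLetra with
        | some j =>
          let lex := String.ofList (pc.2.drop j)
          if PySem.Set.contains pvReservadas lex then
            resultado ++ [("PALABRA_RESERVADA", lex, pc.1 + (j : Int), pc.1 + (pc.2.length : Int) - 1)]
          else resultado
        | none => resultado) acc = acc ++ l.flatMap pvProcesa := by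
  induction l generalizing acc with
  | nil => simp
  | cons pc rest ih =>
    rw [List.foldl_cons, List.flatMap_cons, ih]
    cases hj : pc.2.findIdx? pvEsLetra with
    | none => simp [pvProcesa, hj]
    | some j =>
      simp only [pvProcesa, hj]
      split <;> simp

-- ===== VERDICT (by name: the statement is the Claim_ definition above) =====
theorem tipo_palabra_reservada_spec : Claim_equal_tipo_palabra_reservada := by
  intro entrada _
  unfold Spec_tipo_palabra_reservada tipo_palabra_reservada tipo_palabra_reservada_alt
  rw [pvLoopA_eq entrada.toList entrada.toList.length 0 [] (by omega), pvFold_eq_flatMap]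
  have h0 : pvTrocear entrada.toList = pvChunksP entrada.toList 0 [] := by
    have h1 := pvTrocearGo_eq entrada.toList 0 [] []
    simp only [List.nil_append, zero_add] at h1
    rw [pvTrocear]
    exact h1
  rw [h0, pvChunksP_eq entrada.toList 0 []]
  simp only [List.isEmpty_nil, if_true]
  rw [← pvSpecA_eq_flatMap]
  simp
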